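-- pv_equiv track=rewrite | github.com/luchoh/jcodemunch-mcp | src/jcodemunch_mcp/tools/package_registry.py | _find_entry_point
-- ===== SOURCE A (Python) =====
-- from typing import Optional
--
-- def _find_entry_point(source_files: list[str], language: str) -> Optional[str]:
--     """Find the most likely entry-point file in a list of source files.
--
--     Priority: __init__.py, index.js/ts, main.go, lib.rs, etc.
--     """
--     lang = language.lower() if language else ""
--
--     # Ordered candidate patterns (most to least specific)
--     patterns: list[str] = []
--
--     if lang in ("python",):
--         patterns = ["__init__.py", "main.py", "app.py"]
--     elif lang in ("javascript", "typescript", "tsx", "jsx", "vue"):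
--         patterns = [
--             "index.js", "index.ts", "index.tsx", "index.jsx",
--             "main.js", "main.ts", "src/index.js", "src/index.ts",
--         ]
--     elif lang == "go":
--         patterns = ["main.go", "cmd/main.go"]
--     elif lang == "rust":
--         patterns = ["src/lib.rs", "src/main.rs", "lib.rs", "main.rs"]
--     else:
--         patterns = ["index.js", "main.py", "main.go", "__init__.py"]
--
--     # Try basename-only matches first (common case)
--     for pattern in patterns:
--         for sf in source_files:
--             if sf == pattern or sf.endswith("/" + pattern):
--                 return sf
--
--     # Fall back to first file
--     return source_files[0] if source_files else None
-- ===== SOURCE B (Python) =====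
-- def _find_entry_point(source_files, language):
--     """Single pass over source_files: rank each file by the smallest matching
--     pattern index, keep the lexicographically (rank, position)-best file."""
--     lang = language.lower() if language else ""
--
--     if lang in ("python",):
--         patterns = ["__init__.py", "main.py", "app.py"]
--     elif lang in ("javascript", "typescript", "tsx", "jsx", "vue"):
--         patterns = [
--             "index.js", "index.ts", "index.tsx", "index.jsx",
--             "main.js", "main.ts", "src/index.js", "src/index.ts",
--         ]
--     elif lang == "go":
--         patterns = ["main.go", "cmd/main.go"]
--     elif lang == "rust":
--         patterns = ["src/lib.rs", "src/main.rs", "lib.rs", "main.rs"]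
--     else:
--         patterns = ["index.js", "main.py", "main.go", "__init__.py"]
--
--     best = None  # (rank, file); only replaced on strictly smaller rank
--     for sf in source_files:
--         rank = None
--         for i, pattern in enumerate(patterns):
--             if sf == pattern or sf.endswith("/" + pattern):
--                 rank = i
--                 break
--         if rank is None:
--             continue
--         if best is None or rank < best[0]:
--             best = (rank, sf)
--
--     if best is not None:
--         return best[1]
--     return source_files[0] if source_files else None
-- ===== Notes on version B (the rewrite author's own statement) =====
-- stated objective: alternative
-- what changed: A scans the file list once per pattern (pattern-outer nested loops with early return); B makes a single pass over the files, computing each file's best pattern rank and keeping the file minimizing (rank, position).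
import Mathlib
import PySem

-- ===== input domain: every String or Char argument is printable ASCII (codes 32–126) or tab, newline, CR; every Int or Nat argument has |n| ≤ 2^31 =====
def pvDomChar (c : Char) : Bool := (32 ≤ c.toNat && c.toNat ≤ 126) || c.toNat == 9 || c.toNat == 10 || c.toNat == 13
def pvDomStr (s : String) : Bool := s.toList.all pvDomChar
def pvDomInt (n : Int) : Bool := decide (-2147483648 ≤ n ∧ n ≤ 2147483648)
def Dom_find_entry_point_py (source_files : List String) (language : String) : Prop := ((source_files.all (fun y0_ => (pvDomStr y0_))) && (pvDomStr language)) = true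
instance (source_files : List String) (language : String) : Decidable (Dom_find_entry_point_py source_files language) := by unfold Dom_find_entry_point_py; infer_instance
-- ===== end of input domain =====

-- B replaces A's pattern-outer nested scan by a single pass over the files that
-- keeps the file with the lexicographically least (pattern rank, position) pair
-- (objective: alternative decomposition, same result).


-- ===== PORT A =====
-- shared by both ports: the literal pattern-list selection and the match test
-- (identical lines of code in Source A and Source B)
def pvPatterns (language : String) : List String :=
  let lang := if language == "" then "" else PySem.Str.lower language
  if lang == "python" then ["__init__.py", "main.py", "app.py"]
  else if lang == "javascript" || lang == "typescript" || lang == "tsx" || lang == "jsx" || lang == "vue" then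
    ["index.js", "index.ts", "index.tsx", "index.jsx", "main.js", "main.ts", "src/index.js", "src/index.ts"]
  else if lang == "go" then ["main.go", "cmd/main.go"]
  else if lang == "rust" then ["src/lib.rs", "src/main.rs", "lib.rs", "main.rs"]
  else ["index.js", "main.py", "main.go", "__init__.py"]

def pvMatch (pattern sf : String) : Bool :=
  sf == pattern || PySem.Str.endswith sf ("/" ++ pattern)

-- inner loop of A: first file matching this pattern
def pvScanFiles (pattern : String) (xs : List String) : Option String :=
  match xs with
  | [] => none
  | sf :: rest => if pvMatch pattern sf then some sf else pvScanFiles pattern rest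

-- outer loop of A: first pattern with a matching file
def pvScanPatterns (ps xs : List String) : Option String :=
  match ps with
  | [] => none
  | p :: rest =>
    match pvScanFiles p xs with
    | some sf => some sf
    | none => pvScanPatterns rest xs

def find_entry_point_py (source_files : List String) (language : String) : Option String :=
  match pvScanPatterns (pvPatterns language) source_files with
  | some sf => some sf
  | none => source_files.head?

-- ===== PORT B =====
-- inner loop of B: the smallest pattern index this file matches
def pvRank (ps : List String) (sf : String) : Option Nat :=
  match ps with
  | [] => none
  | p :: rest => if pvMatch p sf then some 0 else (pvRank rest sf).map (· + 1)

-- one step of B's fold: replace the best pair only on a strictly smaller rank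
def pvStep (ps : List String) (best : Option (Nat × String)) (sf : String) : Option (Nat × String) :=
  match pvRank ps sf with
  | none => best
  | some r =>
    match best with
    | none => some (r, sf)
    | some (br, bf) => if r < br then some (r, sf) else some (br, bf)

-- B's single pass over the files
def pvBestLoop (ps : List String) (best : Option (Nat × String)) (xs : List String) : Option (Nat × String) :=
  match xs with
  | [] => best
  | sf :: rest => pvBestLoop ps (pvStep ps best sf) rest

def find_entry_point_py_alt (source_files : List String) (language : String) : Option String :=
  match pvBestLoop (pvPatterns language) none source_files with
  | some (_, f) => some f
  | none => source_files.head?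

-- ===== PRECONDITION & SPEC =====
def Spec_find_entry_point_py (source_files : List String) (language : String) (out : Option String) : Prop := out = find_entry_point_py_alt source_files language
instance (source_files : List String) (language : String) (out : Option String) : Decidable (Spec_find_entry_point_py source_files language out) := by unfold Spec_find_entry_point_py; infer_instance

-- ===== CLAIM (what is proved, stated in full; the proofs are below) =====
def Claim_equal_find_entry_point_py : Prop := ∀ (source_files : List String) (language : String), Dom_find_entry_point_py source_files language → Spec_find_entry_point_py source_files language (find_entry_point_py source_files language)

-- ===== LEMMAS AND PROOFS =====

-- left-biased lexicographic minimum on optional (rank, file) pairs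
def pvMerge (a b : Option (Nat × String)) : Option (Nat × String) :=
  match a, b with
  | none, b => b
  | some a, none => some a
  | some (ra, fa), some (rb, fb) => if rb < ra then some (rb, fb) else some (ra, fa)

-- the (rank, file) pair a single file contributes
def pvPair (ps : List String) (x : String) : Option (Nat × String) :=
  (pvRank ps x).map (fun r => (r, x))

-- right-to-left specification of the minimum over the files
def pvMinRank (ps xs : List String) : Option (Nat × String) :=
  match xs with
  | [] => none
  | x :: rest => pvMerge (pvPair ps x) (pvMinRank ps rest)

-- A's nested scan, instrumented with the pattern index of the result
def pvAIdx (ps xs : List String) : Option (Nat × String) :=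
  match ps with
  | [] => none
  | p :: rest =>
    match pvScanFiles p xs with
    | some f => some (0, f)
    | none => (pvAIdx rest xs).map (fun q => (q.1 + 1, q.2))

theorem pvMerge_none (a : Option (Nat × String)) : pvMerge a none = a := by
  cases a with
  | none => rfl
  | some q => rcases q with ⟨r, f⟩; rfl

theorem pvMerge_assoc (a b c : Option (Nat × String)) :
    pvMerge (pvMerge a b) c = pvMerge a (pvMerge b c) := by
  rcases a with _ | ⟨ra, fa⟩ <;> rcases b with _ | ⟨rb, fb⟩ <;> rcases c with _ | ⟨rc, fc⟩ <;>
    simp only [pvMerge] <;> split_ifs <;> simp only [pvMerge] <;> (try split_ifs) <;>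
      (try rfl) <;> (exfalso; omega)

theorem pvStep_eq_merge (ps : List String) (best : Option (Nat × String)) (sf : String) :
    pvStep ps best sf = pvMerge best (pvPair ps sf) := by
  unfold pvStep pvPair
  cases h : pvRank ps sf with
  | none => simp [pvMerge_none]
  | some r =>
    rcases best with _ | ⟨br, bf⟩ <;> simp [pvMerge]

theorem pvBestLoop_eq (ps xs : List String) :
    ∀ best, pvBestLoop ps best xs = pvMerge best (pvMinRank ps xs) := by
  induction xs with
  | nil => intro best; simp [pvBestLoop, pvMinRank, pvMerge_none]
  | cons x rest ih =>
    intro best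
    simp only [pvBestLoop, pvMinRank, ih, pvStep_eq_merge, pvMerge_assoc]

theorem pvScanPatterns_eq_map (ps xs : List String) :
    pvScanPatterns ps xs = (pvAIdx ps xs).map Prod.snd := by
  induction ps with
  | nil => rfl
  | cons p rest ih =>
    simp only [pvScanPatterns, pvAIdx]
    cases pvScanFiles p xs with
    | some f => rfl
    | none => simp [ih, Option.map_map]; rfl

theorem pvAIdx_nil (ps : List String) : pvAIdx ps [] = none := by
  induction ps with
  | nil => rfl
  | cons p rest ih => simp [pvAIdx, pvScanFiles, ih]

theorem pvMerge_map_shift (a b : Option (Nat × String)) :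
    (pvMerge a b).map (fun q => (q.1 + 1, q.2)) =
      pvMerge (a.map (fun q => (q.1 + 1, q.2))) (b.map (fun q => (q.1 + 1, q.2))) := by
  rcases a with _ | ⟨ra, fa⟩ <;> rcases b with _ | ⟨rb, fb⟩ <;>
    simp only [pvMerge, Option.map_none, Option.map_some] <;> split_ifs <;> (try rfl) <;> (exfalso; omega)

theorem pvMerge_zero (f : String) (b : Option (Nat × String)) :
    pvMerge (some (0, f)) b = some (0, f) := by
  rcases b with _ | ⟨rb, fb⟩ <;> simp [pvMerge]

theorem pvAIdx_cons (ps : List String) (x : String) (xs : List String) :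
    pvAIdx ps (x :: xs) = pvMerge (pvPair ps x) (pvAIdx ps xs) := by
  induction ps with
  | nil => rfl
  | cons p rest ih =>
    simp only [pvAIdx, pvScanFiles, pvPair, pvRank]
    by_cases hm : pvMatch p x = true
    · simp [hm, pvMerge_zero]
    · simp only [Bool.not_eq_true] at hm
      simp only [hm, Bool.false_eq_true, if_false]
      cases hs : pvScanFiles p xs with
      | some f =>
        cases hr : pvRank rest x with
        | none => simp [pvMerge]
        | some r => simp [pvMerge]
      | none =>
        simp only [ih, pvMerge_map_shift]
        congr 1
        simp only [pvPair, Option.map_map]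
        cases pvRank rest x <;> rfl

theorem pvAIdx_eq_minRank (ps xs : List String) : pvAIdx ps xs = pvMinRank ps xs := by
  induction xs with
  | nil => simp [pvAIdx_nil, pvMinRank]
  | cons x rest ih => simp [pvAIdx_cons, pvMinRank, ih]

-- ===== VERDICT (by name: the statement is the Claim_ definition above) =====
theorem find_entry_point_py_spec : Claim_equal_find_entry_point_py := by
  intro source_files language _
  unfold Spec_find_entry_point_py find_entry_point_py find_entry_point_py_alt
  rw [pvScanPatterns_eq_map, pvAIdx_eq_minRank, pvBestLoop_eq]
  simp only [pvMerge]
  cases h : pvMinRank (pvPatterns language) source_files with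
  | none => rfl
  | some q => rcases q with ⟨r, f⟩; rfl
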